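-- pv_equiv track=rewrite | github.com/ModPunchtree/URCL-Code-Optimiser | URCLOptimiser/URCLOptimiser.py | moveDWValues
-- ===== SOURCE A (Python) =====
-- def moveDWValues(tokens: list) -> list:
--     """
--     Takes sanitised, tokenised URCL code.
--
--     Returns URCL code with all DW values moved to the end.
--     """
--
--     DWValues = []
--
--     index = 0
--     while index < len(tokens):
--         line = tokens[index]
--         if line[0] == "DW":
--             DWValues.append(line)
--             tokens.pop(index)
--         elif line[0].startswith("."):
--             if index < len(tokens) - 1:
--                 if tokens[index + 1][0] == "DW":
--                     DWValues.append(line)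
--                     tokens.pop(index)
--                 else:
--                     index += 1
--             else:
--                 index += 1
--         else:
--             index += 1
--
--     tokens += DWValues
--
--     return tokens
-- ===== SOURCE B (Python) =====
-- def moveDWValues(tokens: list) -> list:
--     """
--     Takes sanitised, tokenised URCL code.
--
--     Returns URCL code with all DW values moved to the end.
--     (Single pass; unlike A it does not mutate the input list in place.)
--     """
--     kept = []
--     DWValues = []
--     for line, nxt in zip(tokens, tokens[1:]):
--         if line[0] == "DW" or (line[0].startswith(".") and nxt[0] == "DW"):
--             DWValues.append(line)
--         else:
--             kept.append(line)
--     if tokens: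
--         last = tokens[-1]
--         (DWValues if last[0] == "DW" else kept).append(last)
--     return kept + DWValues
-- ===== Notes on version B (the rewrite author's own statement) =====
-- stated objective: alternative
-- what changed: Replaces the index-rescanning while loop with repeated list.pop by a single left-to-right pass over zip(tokens, tokens[1:]) that splits lines into kept and DW lists and concatenates once; B does not mutate the input list in place.
import Mathlib
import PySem

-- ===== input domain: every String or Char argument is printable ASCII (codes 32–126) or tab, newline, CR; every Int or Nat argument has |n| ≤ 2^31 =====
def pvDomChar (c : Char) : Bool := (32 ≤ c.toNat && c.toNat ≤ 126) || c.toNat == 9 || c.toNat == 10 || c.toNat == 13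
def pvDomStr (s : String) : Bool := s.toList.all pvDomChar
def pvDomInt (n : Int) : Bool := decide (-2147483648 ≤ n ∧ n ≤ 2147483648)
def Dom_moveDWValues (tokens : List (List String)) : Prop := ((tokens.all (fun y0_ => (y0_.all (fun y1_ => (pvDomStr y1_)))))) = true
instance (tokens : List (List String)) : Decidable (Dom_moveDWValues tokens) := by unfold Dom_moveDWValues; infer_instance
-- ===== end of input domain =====

-- B moves each line in one pass instead of A's rescanning pop loop; return-value equivalence only (A mutates its argument in place, B does not).

-- ===== PORT A =====
-- line[0]; Pre_ excludes empty lines, on which Python raises IndexError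
def pvHd0 (l : List String) : String := l.headD ""

-- the while loop of A: state = (current tokens, index, DWValues); fuel bounds the
-- iteration count (each step shrinks tokens.length - index, so tokens.length fuel suffices)
def pvLoopA : Nat → List (List String) → Nat → List (List String) → List (List String)
  | 0, tokens, _, dw => tokens ++ dw
  | fuel + 1, tokens, index, dw =>
    if h : index < tokens.length then
      let line := tokens[index]
      if pvHd0 line = "DW" then
        pvLoopA fuel (tokens.eraseIdx index) index (dw ++ [line])
      else if PySem.Str.startswith (pvHd0 line) "." then
        if h2 : index < tokens.length - 1 then
          if pvHd0 (tokens[index + 1]'(by omega)) = "DW" then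
            pvLoopA fuel (tokens.eraseIdx index) index (dw ++ [line])
          else
            pvLoopA fuel tokens (index + 1) dw
        else
          pvLoopA fuel tokens (index + 1) dw
      else
        pvLoopA fuel tokens (index + 1) dw
    else
      tokens ++ dw

def moveDWValues (tokens : List (List String)) : List (List String) :=
  pvLoopA tokens.length tokens 0 []

-- ===== PORT B =====
def pvAltStep (acc : List (List String) × List (List String)) (p : List String × List String) :
    List (List String) × List (List String) :=
  if pvHd0 p.1 = "DW" ∨ (PySem.Str.startswith (pvHd0 p.1) "." ∧ pvHd0 p.2 = "DW") then
    (acc.1, acc.2 ++ [p.1])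
  else
    (acc.1 ++ [p.1], acc.2)

def moveDWValues_alt (tokens : List (List String)) : List (List String) :=
  let kd := (tokens.zip (tokens.drop 1)).foldl pvAltStep ([], [])
  match tokens.getLast? with
  | none => kd.1 ++ kd.2
  | some last =>
      if pvHd0 last = "DW" then kd.1 ++ (kd.2 ++ [last]) else (kd.1 ++ [last]) ++ kd.2

-- ===== PRECONDITION & SPEC =====
-- Pre_ excludes inputs containing an empty line, on which Python A raises IndexError at line[0]
def Pre_moveDWValues (tokens : List (List String)) : Prop := ∀ l ∈ tokens, l ≠ []
instance (tokens : List (List String)) : Decidable (Pre_moveDWValues tokens) := by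
  unfold Pre_moveDWValues; infer_instance

def pvWitness_moveDWValues : List (List String) :=
  [[".start"], ["MOV", "R1", "R2"], [".d"], ["DW", "5"], ["ADD", "R1", "R1", "R2"]]

def Spec_moveDWValues (tokens : List (List String)) (out : List (List String)) : Prop := out = moveDWValues_alt tokens
instance (tokens : List (List String)) (out : List (List String)) : Decidable (Spec_moveDWValues tokens out) := by unfold Spec_moveDWValues; infer_instance

-- ===== CLAIM (what is proved, stated in full; the proofs are below) =====
def Claim_equal_moveDWValues : Prop := ∀ (tokens : List (List String)), Dom_moveDWValues tokens → Pre_moveDWValues tokens → Spec_moveDWValues tokens (moveDWValues tokens)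

-- ===== LEMMAS AND PROOFS =====

-- pure characterisation both ports are reduced to: (kept lines, moved lines) in original order
def pvProc : List (List String) → List (List String) × List (List String)
  | [] => ([], [])
  | [l] => if pvHd0 l = "DW" then ([], [l]) else ([l], [])
  | l :: r :: rest =>
      let kd := pvProc (r :: rest)
      if pvHd0 l = "DW" ∨ (PySem.Str.startswith (pvHd0 l) "." ∧ pvHd0 r = "DW") then
        (kd.1, l :: kd.2)
      else
        (l :: kd.1, kd.2)

theorem pvLoopA_eq (S : List (List String)) :
    ∀ (f : Nat), S.length ≤ f → ∀ (K dw : List (List String)),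
      pvLoopA f (K ++ S) K.length dw = K ++ (pvProc S).1 ++ (dw ++ (pvProc S).2) := by
  induction S with
  | nil =>
    intro f _ K dw
    cases f with
    | zero => simp [pvLoopA, pvProc]
    | succ f => rw [pvLoopA]; simp [pvProc]
  | cons l rest ih =>
    intro f hf K dw
    obtain ⟨f, rfl⟩ : ∃ f', f = f' + 1 := ⟨f - 1, by simp at hf; omega⟩
    have hfr : rest.length ≤ f := by simp at hf; omega
    rw [pvLoopA]
    have hlen : K.length < (K ++ l :: rest).length := by simp
    have hget : (K ++ l :: rest)[K.length]'hlen = l := by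
      simp [List.getElem_append_right (Nat.le_refl K.length)]
    have herase : (K ++ l :: rest).eraseIdx K.length = K ++ rest := by
      rw [List.eraseIdx_append_of_length_le (Nat.le_refl K.length)]
      simp
    simp only [hlen, dif_pos, hget]
    by_cases hdw : pvHd0 l = "DW"
    · -- DW line popped
      simp only [hdw, herase]
      cases rest with
      | nil =>
        cases f with
        | zero => simp [pvLoopA, pvProc, hdw]
        | succ f => rw [pvLoopA]; simp [pvProc, hdw]
      | cons r rest2 =>
        rw [ih f hfr K (dw ++ [l])]
        simp [pvProc, hdw]
    · simp only [if_neg hdw]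
      by_cases hlab : PySem.Str.startswith (pvHd0 l) "." = true
      · have hlab' : PySem.Chars.startswith (pvHd0 l).toList ['.'] = true := by simpa using hlab
        simp only [hlab]
        cases rest with
        | nil =>
          -- label is last remaining line: index = len - 1
          have h2 : ¬ K.length < (K ++ [l]).length - 1 := by simp
          simp only [h2, dif_neg, not_false_iff]
          have hK : K.length + 1 = (K ++ [l]).length := by simp
          cases f with
          | zero => simp [pvLoopA, pvProc, hdw]
          | succ f => rw [hK, pvLoopA]; simp [pvProc, hdw]
        | cons r rest2 =>
          have h2 : K.length < (K ++ l :: r :: rest2).length - 1 := by simp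
          have hget2 : (K ++ l :: r :: rest2)[K.length + 1]'(by simp) = r := by
            have : K.length ≤ K.length + 1 := by omega
            simp [List.getElem_append_right this]
          simp only [h2, dif_pos, hget2]
          by_cases hr : pvHd0 r = "DW"
          · simp only [hr, herase]
            rw [ih f hfr K (dw ++ [l])]
            simp [pvProc, hdw, hlab', hr]
          · simp only [if_neg hr]
            have hK : K.length + 1 = (K ++ [l]).length := by simp
            have hS : K ++ l :: r :: rest2 = (K ++ [l]) ++ r :: rest2 := by simp
            rw [hS, hK, ih f hfr (K ++ [l]) dw]
            simp [pvProc, hdw, hlab', hr]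
      · have hlab' : ¬ PySem.Chars.startswith (pvHd0 l).toList ['.'] = true := by simpa using hlab
        simp only [hlab, Bool.false_eq_true, if_neg, not_false_iff]
        have hK : K.length + 1 = (K ++ [l]).length := by simp
        have hS : K ++ l :: rest = (K ++ [l]) ++ rest := by simp
        rw [hS, hK, ih f hfr (K ++ [l]) dw]
        cases rest with
        | nil => simp [pvProc, hdw]
        | cons r rest2 => simp [pvProc, hdw, hlab']

theorem pvAlt_eq (S : List (List String)) :
    ∀ (k d : List (List String)),
      (match S.getLast? with
       | none =>
           ((S.zip (S.drop 1)).foldl pvAltStep (k, d)).1 ++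
             ((S.zip (S.drop 1)).foldl pvAltStep (k, d)).2
       | some last =>
           if pvHd0 last = "DW" then
             ((S.zip (S.drop 1)).foldl pvAltStep (k, d)).1 ++
               (((S.zip (S.drop 1)).foldl pvAltStep (k, d)).2 ++ [last])
           else
             (((S.zip (S.drop 1)).foldl pvAltStep (k, d)).1 ++ [last]) ++
               ((S.zip (S.drop 1)).foldl pvAltStep (k, d)).2) =
      (k ++ (pvProc S).1) ++ (d ++ (pvProc S).2) := by
  induction S with
  | nil => intro k d; simp [pvProc]
  | cons l rest ih =>
    intro k d
    cases rest with
    | nil =>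
      simp only [List.drop_succ_cons]
      by_cases h : pvHd0 l = "DW" <;> simp [pvProc, h]
    | cons r rest2 =>
      have hz : ((l :: r :: rest2).zip ((l :: r :: rest2).drop 1)) =
          (l, r) :: ((r :: rest2).zip ((r :: rest2).drop 1)) := by simp
      have hlast : (l :: r :: rest2).getLast? = (r :: rest2).getLast? := by
        simp [List.getLast?_cons_cons]
      rw [hz, hlast]
      simp only [List.foldl_cons]
      by_cases hc : pvHd0 l = "DW" ∨ (PySem.Str.startswith (pvHd0 l) "." ∧ pvHd0 r = "DW")
      · have hc' : pvHd0 l = "DW" ∨ (PySem.Chars.startswith (pvHd0 l).toList ['.'] = true ∧ pvHd0 r = "DW") := by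
          simpa using hc
        have hstep : pvAltStep (k, d) (l, r) = (k, d ++ [l]) := by
          simp only [pvAltStep]; rw [if_pos hc]
        rw [hstep, ih k (d ++ [l])]
        simp [pvProc, hc']
      · have hc' : ¬ (pvHd0 l = "DW" ∨ (PySem.Chars.startswith (pvHd0 l).toList ['.'] = true ∧ pvHd0 r = "DW")) := by
          simpa using hc
        have hstep : pvAltStep (k, d) (l, r) = (k ++ [l], d) := by
          simp only [pvAltStep]; rw [if_neg hc]
        rw [hstep, ih (k ++ [l]) d]
        simp [pvProc, hc']

-- ===== VERDICT (by name: the statement is the Claim_ definition above) =====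
theorem moveDWValues_spec : Claim_equal_moveDWValues := by
  intro tokens _ _
  unfold Spec_moveDWValues moveDWValues moveDWValues_alt
  have hA := pvLoopA_eq tokens tokens.length (Nat.le_refl _) [] []
  simp only [List.nil_append, List.length_nil] at hA
  have hB := pvAlt_eq tokens [] []
  simp only [List.nil_append] at hB
  rw [hA, ← hB]
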